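-- pv_equiv track=rewrite | github.com/FriendlyUser/hiddenrepo | folder/task11.py | day01
-- ===== SOURCE A (Python) =====
-- def day01(input_data):
--     def calculate_fuel(mass):
--         return int(mass / 3) - 2
--
--     def part1():
--         total = 0
--         for module_mass in input_data.splitlines():
--             total += calculate_fuel(int(module_mass))
--         return total
--
--     def part2():
--         total = 0
--         for module_mass in input_data.splitlines():
--             fuel = int(module_mass)
--             while fuel >= 9:
--                 fuel = calculate_fuel(fuel)
--                 total += fuel
--         return total
--
--     return part1(), part2()
-- ===== SOURCE B (Python) =====
-- def day01(input_data):
--     def calculate_fuel(mass):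
--         return int(mass / 3) - 2
--
--     def fuel_required(mass):
--         f = calculate_fuel(mass)
--         return 0 if f <= 0 else f + fuel_required(f)
--
--     masses = [int(line) for line in input_data.splitlines()]
--     return sum(calculate_fuel(m) for m in masses), sum(fuel_required(m) for m in masses)
-- ===== Notes on version B (the rewrite author's own statement) =====
-- stated objective: alternative
-- what changed: part2's per-line mutable while-loop is replaced by a recursive fuel_required helper, and both parts become sums over a single pre-parsed list of masses instead of two accumulator loops re-splitting the input.
import Mathlib
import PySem

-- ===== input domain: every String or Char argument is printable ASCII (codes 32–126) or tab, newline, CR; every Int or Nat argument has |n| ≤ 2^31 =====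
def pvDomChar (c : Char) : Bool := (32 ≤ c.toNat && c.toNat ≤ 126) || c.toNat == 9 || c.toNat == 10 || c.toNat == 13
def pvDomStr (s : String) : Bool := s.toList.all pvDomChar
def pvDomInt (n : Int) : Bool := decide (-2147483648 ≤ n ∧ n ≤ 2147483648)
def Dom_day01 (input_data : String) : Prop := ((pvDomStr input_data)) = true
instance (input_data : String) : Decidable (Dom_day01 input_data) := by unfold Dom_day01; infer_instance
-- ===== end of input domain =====

-- B replaces A's per-line while-loop for part 2 by a recursive fuel_required helper and
-- sums both parts over a once-parsed list of masses (alternative decomposition, same cost).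

-- Model of CPython's `int(mass / 3)`: int/int true division is the CORRECTLY ROUNDED
-- (round-to-nearest, ties-to-even, 53-bit significand) double of the exact quotient,
-- then int() truncates toward zero.  pvRoundNE rounds num/den to the nearest integer,
-- ties to even; pvFdiv3 normalises a/3 to a 53-bit significand m with a/(3·2^e) ∈
-- [2^52, 2^53) and returns trunc(m·2^e).  Exact whenever the double does not overflow,
-- i.e. |mass| < 3·(2^1024 − 2^970) (Pre_day01 below); this helper is shared by both
-- ports because both Pythons contain the identical expression `int(mass / 3) - 2`.
def pvRoundNE (num den : Nat) : Nat :=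
  let q := num / den
  let r := num % den
  if 2 * r > den ∨ (2 * r = den ∧ q % 2 = 1) then q + 1 else q

-- log2(a) − e where m = round(a/(3·2^e)): 53 when a/3 ∈ [2^(log2 a − 1), ·), else 54
def pvFexp (a : Nat) : Nat := if 3 * 2 ^ Nat.log2 a ≤ 2 * a then 53 else 54

def pvFdiv3 (a : Nat) : Nat :=
  if a = 0 then 0
  else if pvFexp a ≤ Nat.log2 a then
    pvRoundNE a (3 * 2 ^ (Nat.log2 a - pvFexp a)) * 2 ^ (Nat.log2 a - pvFexp a)
  else pvRoundNE (a * 2 ^ (pvFexp a - Nat.log2 a)) 3 / 2 ^ (pvFexp a - Nat.log2 a)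

-- int(n/3) for any Int: truncation is symmetric, rounding is sign-symmetric
def pvIntDiv3 (n : Int) : Int :=
  if 0 ≤ n then ((pvFdiv3 n.toNat : Nat) : Int) else -((pvFdiv3 (-n).toNat : Nat) : Int)

-- ===== PORT A =====
-- calculate_fuel(mass) = int(mass / 3) - 2 (float-exact model above)
def pvCalcFuelA (mass : Int) : Int := pvIntDiv3 mass - 2

-- int(module_mass); a line that is no int literal raises ValueError (excluded by Pre_day01)
def pvParseA (s : String) : Int := (PySem.Int.ofStr? s).getD 0

def pvPart1A (lines : List String) : Int :=
  lines.foldl (fun total module_mass => total + pvCalcFuelA (pvParseA module_mass)) 0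

-- the 'while fuel >= 9: fuel = calculate_fuel(fuel); total += fuel' loop.  The Nat
-- argument is FUEL that only makes the recursion structural: each iteration strictly
-- shrinks fuel.toNat (pvIntDiv3_le_self below), so the initial budget fuel.toNat + 1
-- is never exhausted and the 0-case is unreachable (pvWhileAF_eq_fuelReqF proves the
-- loop's value under exactly this budget).
def pvWhileAF : Nat → Int → Int → Int
  | 0, _, total => total
  | k + 1, fuel, total =>
    if 9 ≤ fuel then
      let f := pvCalcFuelA fuel
      pvWhileAF k f (total + f)
    else total

def pvWhileA (fuel total : Int) : Int := pvWhileAF (fuel.toNat + 1) fuel total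

def pvPart2A (lines : List String) : Int :=
  lines.foldl (fun total module_mass => pvWhileA (pvParseA module_mass) total) 0

def day01 (input_data : String) : Int × Int :=
  (pvPart1A (PySem.Str.splitlines input_data), pvPart2A (PySem.Str.splitlines input_data))

-- ===== PORT B =====
def pvCalcFuelB (mass : Int) : Int := pvIntDiv3 mass - 2   -- same expression in Source B

-- recursive fuel_required, with the same kind of never-exhausted fuel budget as
-- pvWhileAF: each recursive call strictly shrinks mass.toNat
def pvFuelReqF : Nat → Int → Int
  | 0, _ => 0
  | k + 1, mass =>
    if pvCalcFuelB mass ≤ 0 then 0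
    else pvCalcFuelB mass + pvFuelReqF k (pvCalcFuelB mass)

def pvFuelRequired (mass : Int) : Int := pvFuelReqF (mass.toNat + 1) mass

def pvParseB (s : String) : Int := (PySem.Int.ofStr? s).getD 0

def day01_alt (input_data : String) : Int × Int :=
  let masses := (PySem.Str.splitlines input_data).map pvParseB
  ((masses.map pvCalcFuelB).sum, (masses.map pvFuelRequired).sum)

-- ===== PRECONDITION & SPEC =====
-- Pre_day01 excludes exactly the inputs on which the Python A raises: a ValueError when some
-- line is not an int literal, and an OverflowError when some |mass| ≥ 3·(2^1024 − 2^970),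
-- where mass/3 overflows the float; B's Python raises identically there.
-- (the bound is written as a decimal literal so that `decide` needs no 2^1024 pow-recursion)
def pvOverflowBound : Nat := 539307940458694742381186914215910245239802398130113480808521336941334904878294252839947053932761621288990859250078663732839666643555821207891972466014517462045726706002125151028821564537453134595293427190810209566714100878868528744459582504809425878157222505333096532113028134679098524279128640533712523493376

def Pre_day01 (input_data : String) : Prop :=
  ((PySem.Str.splitlines input_data).all (fun l =>
    match PySem.Int.ofStr? l with
    | some m => decide (m.natAbs < pvOverflowBound)
    | none => false)) = true
instance (input_data : String) : Decidable (Pre_day01 input_data) := by unfold Pre_day01; infer_instance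

def pvWitness_day01 : String := "12\n14\n1969\n100756"

def Spec_day01 (input_data : String) (out : Int × Int) : Prop := out = day01_alt input_data
instance (input_data : String) (out : Int × Int) : Decidable (Spec_day01 input_data out) := by unfold Spec_day01; infer_instance

-- ===== CLAIM (what is proved, stated in full; the proofs are below) =====
def Claim_equal_day01 : Prop := ∀ (input_data : String), Dom_day01 input_data → Pre_day01 input_data → Spec_day01 input_data (day01 input_data)

-- ===== LEMMAS AND PROOFS =====

-- rounding error bracket: |2·(m·den) − 2·num| ≤ den
theorem pvRoundNE_bounds (num den : Nat) (hd : 0 < den) :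
    2 * num ≤ 2 * (pvRoundNE num den * den) + den ∧
      2 * (pvRoundNE num den * den) ≤ 2 * num + den := by
  have hx := Nat.mod_add_div' num den
  have hlt := Nat.mod_lt num hd
  unfold pvRoundNE
  simp only
  split_ifs with h
  · rw [Nat.add_mul, one_mul]
    set A := num / den * den with hA
    set R := num % den with hR
    omega
  · set A := num / den * den with hA
    set R := num % den with hR
    omega

theorem pvFexp_bounds (a : Nat) : 53 ≤ pvFexp a ∧ pvFexp a ≤ 54 := by
  unfold pvFexp; split_ifs <;> omega

-- the rounded-then-truncated quotient never exceeds the dividend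
theorem pvFdiv3_le (a : Nat) : pvFdiv3 a ≤ a := by
  rw [pvFdiv3]
  split_ifs with h0 hdt
  · omega
  · set t := Nat.log2 a with ht
    set d := pvFexp a with hd
    have h1 : 2 ^ t ≤ a := Nat.log2_self_le h0
    have hd53 := pvFexp_bounds a
    rw [← hd] at hd53
    set x := 2 ^ (t - d) with hxdef
    have hxpos : 0 < x := Nat.pow_pos (by omega)
    obtain ⟨hb1, hb2⟩ := pvRoundNE_bounds a (3 * x) (by omega)
    set m := pvRoundNE a (3 * x) with hm
    have hassoc : m * (3 * x) = 3 * (m * x) := by ring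
    rw [hassoc] at hb1 hb2
    have hx53 : x * 2 ^ 53 ≤ a := by
      calc x * 2 ^ 53 = 2 ^ (t - d + 53) := by rw [hxdef, pow_add]
        _ ≤ 2 ^ t := Nat.pow_le_pow_right (by omega) (by omega)
        _ ≤ a := h1
    set V := m * x with hV
    omega
  · set t := Nat.log2 a with ht
    set d := pvFexp a with hd
    set s := d - t with hs
    set X := 2 ^ s with hXdef
    have hd53 := pvFexp_bounds a
    rw [← hd] at hd53
    have hs1 : 1 ≤ s := by omega
    have hX2 : 2 ≤ X := by
      calc (2 : Nat) = 2 ^ 1 := by norm_num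
        _ ≤ 2 ^ s := Nat.pow_le_pow_right (by omega) hs1
    obtain ⟨hb1, hb2⟩ := pvRoundNE_bounds (a * X) 3 (by omega)
    set m := pvRoundNE (a * X) 3 with hm
    set v := m / X with hv
    have hvX : v * X ≤ m := Nat.div_mul_le_self m X
    have key : 3 * v * X ≤ (a + 1) * X := by
      have e1 : 3 * v * X = 3 * (v * X) := by ring
      have e2 : (a + 1) * X = a * X + X := by ring
      rw [e1, e2]
      set Y := a * X with hY
      set W := v * X with hW
      omega
    have h3v : 3 * v ≤ a + 1 := Nat.le_of_mul_le_mul_right key (by omega)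
    omega

-- for a ≥ 9 the rounded quotient stays ≥ 3 (A keeps looping ⟺ B keeps recursing)
theorem pvFdiv3_ge9 (a : Nat) (h9 : 9 ≤ a) : 3 ≤ pvFdiv3 a := by
  rw [pvFdiv3]
  split_ifs with h0 hdt
  · omega
  · set t := Nat.log2 a with ht
    set d := pvFexp a with hd
    have h1 : 2 ^ t ≤ a := Nat.log2_self_le h0
    have hd53 := pvFexp_bounds a
    rw [← hd] at hd53
    set x := 2 ^ (t - d) with hxdef
    have hxpos : 0 < x := Nat.pow_pos (by omega)
    obtain ⟨hb1, hb2⟩ := pvRoundNE_bounds a (3 * x) (by omega)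
    set m := pvRoundNE a (3 * x) with hm
    have hassoc : m * (3 * x) = 3 * (m * x) := by ring
    rw [hassoc] at hb1 hb2
    have hx53 : x * 2 ^ 53 ≤ a := by
      calc x * 2 ^ 53 = 2 ^ (t - d + 53) := by rw [hxdef, pow_add]
        _ ≤ 2 ^ t := Nat.pow_le_pow_right (by omega) (by omega)
        _ ≤ a := h1
    set V := m * x with hV
    omega
  · set t := Nat.log2 a with ht
    set d := pvFexp a with hd
    set s := d - t with hs
    set X := 2 ^ s with hXdef
    have hXpos : 0 < X := Nat.pow_pos (by omega)
    obtain ⟨hb1, hb2⟩ := pvRoundNE_bounds (a * X) 3 (by omega)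
    set m := pvRoundNE (a * X) 3 with hm
    set v := m / X with hv
    have hm1 : X * (m / X) + m % X = m := Nat.div_add_mod m X
    have hm2 : m % X < X := Nat.mod_lt _ hXpos
    have hXv : X * (m / X) = v * X := by rw [hv]; ring
    rw [hXv] at hm1
    have h9X : 9 * X ≤ a * X := Nat.mul_le_mul_right X h9
    by_contra hcon
    push Not at hcon
    have hvle : v ≤ 2 := by omega
    have hW2 : v * X ≤ 2 * X := Nat.mul_le_mul_right X hvle
    set Y := a * X with hY
    set W := v * X with hW
    omega

-- for a < 9 the quotient is ≤ 2 (A stops ⟺ B stops)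
theorem pvFdiv3_lt9 (a : Nat) (h : a < 9) : pvFdiv3 a ≤ 2 := by
  interval_cases a <;> decide

theorem pvIntDiv3_le_self (n : Int) (h : 0 ≤ n) : pvIntDiv3 n ≤ n := by
  rw [pvIntDiv3, if_pos h]
  have := pvFdiv3_le n.toNat
  omega

theorem pvIntDiv3_nonpos (n : Int) (h : n ≤ 0) : pvIntDiv3 n ≤ 0 := by
  rw [pvIntDiv3]
  split_ifs with h0
  · have hn : n = 0 := le_antisymm h h0
    subst hn
    decide
  · omega

theorem pvIntDiv3_ge9 (n : Int) (h : 9 ≤ n) : 3 ≤ pvIntDiv3 n := by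
  rw [pvIntDiv3, if_pos (by omega)]
  have := pvFdiv3_ge9 n.toNat (by omega)
  omega

theorem pvIntDiv3_lt9 (n : Int) (h : n < 9) : pvIntDiv3 n ≤ 2 := by
  by_cases h0 : 0 ≤ n
  · rw [pvIntDiv3, if_pos h0]
    have := pvFdiv3_lt9 n.toNat (by omega)
    omega
  · have := pvIntDiv3_nonpos n (by omega)
    omega

-- A's fueled while-loop accumulates exactly B's fueled fuel_required, for any
-- sufficient fuel budget k > fuel.toNat (both ports start with k = fuel.toNat + 1)
theorem pvWhileAF_eq_fuelReqF (k : Nat) :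
    ∀ (fuel total : Int), fuel.toNat < k →
      pvWhileAF k fuel total = total + pvFuelReqF k fuel := by
  induction k with
  | zero => intro fuel total hk; omega
  | succ k ih =>
    intro fuel total hk
    rw [pvWhileAF, pvFuelReqF]
    by_cases h : 9 ≤ fuel
    · have h1 := pvIntDiv3_ge9 fuel h
      have h2 := pvIntDiv3_le_self fuel (by omega)
      simp only [pvCalcFuelA, pvCalcFuelB]
      rw [if_pos h, if_neg (by omega)]
      rw [ih (pvIntDiv3 fuel - 2) (total + (pvIntDiv3 fuel - 2)) (by omega)]
      ring
    · have h1 := pvIntDiv3_lt9 fuel (by omega)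
      simp only [pvCalcFuelA, pvCalcFuelB]
      rw [if_neg h, if_pos (by omega)]
      ring

theorem pvWhile_eq_fuelRequired (fuel total : Int) :
    pvWhileA fuel total = total + pvFuelRequired fuel := by
  rw [pvWhileA, pvFuelRequired]
  exact pvWhileAF_eq_fuelReqF (fuel.toNat + 1) fuel total (by omega)

theorem pvFoldl_add_eq_sum_map (g : String → Int) (lines : List String) (init : Int) :
    lines.foldl (fun t l => t + g l) init = init + (lines.map g).sum := by
  induction lines generalizing init with
  | nil => simp
  | cons l ls ih => simp [List.foldl_cons, ih]; ring

theorem pvPart1_eq (lines : List String) :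
    pvPart1A lines = ((lines.map pvParseB).map pvCalcFuelB).sum := by
  unfold pvPart1A
  rw [pvFoldl_add_eq_sum_map (fun l => pvCalcFuelA (pvParseA l)) lines 0]
  simp [List.map_map, Function.comp_def, pvCalcFuelA, pvCalcFuelB, pvParseA, pvParseB]

theorem pvPart2_eq (lines : List String) :
    pvPart2A lines = ((lines.map pvParseB).map pvFuelRequired).sum := by
  unfold pvPart2A
  have hstep : (fun (total : Int) (l : String) => pvWhileA (pvParseA l) total)
      = fun total l => total + pvFuelRequired (pvParseB l) := by
    funext t l; rw [pvWhile_eq_fuelRequired]; rfl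
  rw [hstep, pvFoldl_add_eq_sum_map (fun l => pvFuelRequired (pvParseB l)) lines 0]
  simp [List.map_map, Function.comp_def]

-- ===== VERDICT (by name: the statement is the Claim_ definition above) =====
theorem day01_spec : Claim_equal_day01 := by
  intro input_data _ _
  unfold Spec_day01 day01 day01_alt
  rw [pvPart1_eq, pvPart2_eq]
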